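-- pv_equiv track=rewrite | github.com/pjhanwar/N-Queens-with-Obstacles | Nqueens.py | check_row_before
-- ===== SOURCE A (Python) =====
-- def check_row_before(board,n,row,clm):
--     if clm != 0:
--         for j in range (clm-1,-1,-1):
--             if (board[row][j] == '2'):
--                 return True
--             elif (board[row][j] == '1') :
--                 return False
--             else:
--                 continue
--         return True
--     else:
--         return True
-- ===== SOURCE B (Python) =====
-- def check_row_before(board, n, row, clm):
--     if clm <= 0:
--         return True
--     last_q = last_o = -1
--     i = 0
--     for cell in board[row][:clm]:
--         if cell == '1':
--             last_q = i
--         elif cell == '2':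
--             last_o = i
--         i += 1
--     return last_q <= last_o
-- ===== Notes on version B (the rewrite author's own statement) =====
-- stated objective: alternative
-- what changed: Replaces the right-to-left early-exit scan with a single forward pass over board[row][:clm] that records the last positions of '1' and '2' and compares them.
import Mathlib
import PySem

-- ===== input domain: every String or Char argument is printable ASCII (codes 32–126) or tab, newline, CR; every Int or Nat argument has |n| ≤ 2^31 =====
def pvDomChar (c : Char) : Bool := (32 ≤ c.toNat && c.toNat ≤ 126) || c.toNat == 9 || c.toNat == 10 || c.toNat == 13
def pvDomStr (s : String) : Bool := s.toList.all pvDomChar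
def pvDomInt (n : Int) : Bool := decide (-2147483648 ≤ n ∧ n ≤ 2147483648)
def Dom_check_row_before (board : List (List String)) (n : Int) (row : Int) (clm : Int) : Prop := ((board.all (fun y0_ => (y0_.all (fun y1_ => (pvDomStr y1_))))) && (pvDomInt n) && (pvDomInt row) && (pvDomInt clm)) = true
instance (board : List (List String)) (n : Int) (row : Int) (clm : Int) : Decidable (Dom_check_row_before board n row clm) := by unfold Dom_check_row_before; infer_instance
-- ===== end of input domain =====

-- B replaces A's right-to-left early-exit scan with one forward pass over board[row][:clm]
-- recording the last positions of '1' and '2' (alternative decomposition, same cost).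


-- ===== PORT A =====
-- the for-loop over range(clm-1,-1,-1) with early returns; board[row][j] via pyGet?/getD
def checkRowLoopA (board : List (List String)) (row : Int) : List Int → Bool
  | [] => true
  | j :: rest =>
    if (PySem.List.pyGet? ((PySem.List.pyGet? board row).getD []) j).getD "" = "2" then true
    else if (PySem.List.pyGet? ((PySem.List.pyGet? board row).getD []) j).getD "" = "1" then false
    else checkRowLoopA board row rest

def check_row_before (board : List (List String)) (n : Int) (row : Int) (clm : Int) : Bool :=
  if clm ≠ 0 then
    checkRowLoopA board row (PySem.List.pyRange (clm - 1) (-1) (-1))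
  else true

-- ===== PORT B =====
def check_row_before_alt (board : List (List String)) (n : Int) (row : Int) (clm : Int) : Bool :=
  if clm ≤ 0 then true
  else
    let seg := PySem.List.slice ((PySem.List.pyGet? board row).getD []) none (some clm)
    let st := seg.foldl (fun (st : Int × Int × Int) cell =>
      if cell = "1" then (st.1 + 1, st.1, st.2.2)
      else if cell = "2" then (st.1 + 1, st.2.1, st.1)
      else (st.1 + 1, st.2.1, st.2.2)) (0, -1, -1)
    decide (st.2.1 ≤ st.2.2)

-- ===== PRECONDITION & SPEC =====
-- Pre_ excludes exactly the inputs on which A raises IndexError: clm > 0 with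
-- row out of Python range for board, or clm exceeding the length of board[row].
def Pre_check_row_before (board : List (List String)) (n : Int) (row : Int) (clm : Int) : Prop :=
  clm ≤ 0 ∨ (PySem.Raise.InRange board.length row ∧ clm ≤ ((PySem.List.pyGet? board row).getD []).length)
instance (board : List (List String)) (n : Int) (row : Int) (clm : Int) : Decidable (Pre_check_row_before board n row clm) := by unfold Pre_check_row_before; infer_instance

def pvWitness_check_row_before : List (List String) × Int × Int × Int := ([["0", "2", "1"]], 3, 0, 2)

def Spec_check_row_before (board : List (List String)) (n : Int) (row : Int) (clm : Int) (out : Bool) : Prop := out = check_row_before_alt board n row clm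
instance (board : List (List String)) (n : Int) (row : Int) (clm : Int) (out : Bool) : Decidable (Spec_check_row_before board n row clm out) := by unfold Spec_check_row_before; infer_instance

-- ===== CLAIM (what is proved, stated in full; the proofs are below) =====
def Claim_equal_check_row_before : Prop := ∀ (board : List (List String)) (n : Int) (row : Int) (clm : Int), Dom_check_row_before board n row clm → Pre_check_row_before board n row clm → Spec_check_row_before board n row clm (check_row_before board n row clm)

-- ===== LEMMAS AND PROOFS =====
-- right-to-left semantics of either program, as a scan over the reversed segment
def scanRev : List String → Bool
  | [] => true
  | c :: r => if c = "2" then true else if c = "1" then false else scanRev r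

theorem scanRev_snoc (seg : List String) (c : String) :
    scanRev (seg ++ [c]).reverse = if c = "2" then true else if c = "1" then false else scanRev seg.reverse := by
  simp [scanRev]

-- A's loop over [k-1, …, 0] equals scanRev of the reversed first k elements of the row
theorem loopA_eq_scanRev (board : List (List String)) (row : Int) (rowL : List String)
    (hrow : (PySem.List.pyGet? board row).getD [] = rowL) (k : Nat) (hk : k ≤ rowL.length) :
    checkRowLoopA board row (PySem.List.pyRange ((k : Int) - 1) (-1) (-1)) = scanRev (rowL.take k).reverse := by
  induction k with
  | zero =>
      rw [PySem.List.pyRange_neg_one_eq_nil (by omega)]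
      simp [checkRowLoopA, scanRev]
  | succ m ih =>
      rw [show ((m + 1 : Nat) : Int) - 1 = (m : Int) by push_cast; ring,
          PySem.List.pyRange_neg_one_cons (by omega)]
      have hm : m < rowL.length := by omega
      have hget : (PySem.List.pyGet? ((PySem.List.pyGet? board row).getD []) (m : Int)).getD "" = rowL[m] := by
        rw [hrow]; simp [PySem.List.pyGet?_natCast, hm]
      have htake : rowL.take (m + 1) = rowL.take m ++ [rowL[m]] := by
        rw [List.take_succ]; simp [hm]
      rw [htake, scanRev_snoc]
      simp only [checkRowLoopA, hget]
      rw [show (m : Int) - 1 = ((m : Nat) : Int) - 1 by norm_num]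
      rw [ih (by omega)]

-- B's forward fold, abstracted step function (definitionally equal to the lambda in the port)
def stepB (st : Int × Int × Int) (cell : String) : Int × Int × Int :=
  if cell = "1" then (st.1 + 1, st.1, st.2.2)
  else if cell = "2" then (st.1 + 1, st.2.1, st.1)
  else (st.1 + 1, st.2.1, st.2.2)

theorem foldB_spec (seg : List String) (i0 lq lo : Int) (hlq : lq < i0) (hlo : lo < i0) :
    (seg.foldl stepB (i0, lq, lo)).1 = i0 + seg.length ∧
    (seg.foldl stepB (i0, lq, lo)).2.1 < (seg.foldl stepB (i0, lq, lo)).1 ∧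
    (seg.foldl stepB (i0, lq, lo)).2.2 < (seg.foldl stepB (i0, lq, lo)).1 ∧
    (decide ((seg.foldl stepB (i0, lq, lo)).2.1 ≤ (seg.foldl stepB (i0, lq, lo)).2.2) = scanRev seg.reverse ∨
      (seg.reverse.all (fun c => ¬ (c = "1" ∨ c = "2")) ∧
        (seg.foldl stepB (i0, lq, lo)).2.1 = lq ∧ (seg.foldl stepB (i0, lq, lo)).2.2 = lo)) := by
  induction seg using List.reverseRecOn generalizing i0 lq lo with
  | nil => exact ⟨by simp, by simpa, by simpa, Or.inr ⟨by simp, rfl, rfl⟩⟩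
  | append_singleton seg c ih =>
      obtain ⟨h1, h2, h3, h4⟩ := ih i0 lq lo hlq hlo
      simp only [List.foldl_append, List.foldl_cons, List.foldl_nil, List.reverse_append,
        List.reverse_cons, List.reverse_nil, List.nil_append, List.cons_append,
        List.length_append, List.length_cons, List.length_nil]
      by_cases hc1 : c = "1"
      · refine ⟨?_, ?_, ?_, Or.inl ?_⟩ <;> simp [stepB, hc1, scanRev, h1] <;> omega
      · by_cases hc2 : c = "2"
        · refine ⟨?_, ?_, ?_, Or.inl ?_⟩ <;> simp [stepB, hc1, hc2, scanRev, h1] <;> omega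
        · refine ⟨?_, ?_, ?_, ?_⟩
          · simp [stepB, hc1, hc2, h1]; ring
          · simp [stepB, hc1, hc2]; omega
          · simp [stepB, hc1, hc2]; omega
          · simp only [stepB, hc1, hc2, if_false, scanRev]
            rcases h4 with h4 | ⟨ha, he1, he2⟩
            · exact Or.inl (by simpa [hc1, hc2] using h4)
            · have ha' : ∀ x ∈ seg, ¬x = "1" ∧ ¬x = "2" := by simpa [not_or] using ha
              exact Or.inr ⟨by simp [hc1, hc2]; exact ha', he1, he2⟩

theorem scanRev_all_true (l : List String) (h : l.all (fun c => ¬ (c = "1" ∨ c = "2"))) : scanRev l = true := by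
  induction l with
  | nil => simp [scanRev]
  | cons c r ih =>
      simp only [List.all_cons, Bool.and_eq_true, decide_eq_true_eq] at h
      have h1 : c ≠ "1" := fun hh => h.1 (Or.inl hh)
      have h2 : c ≠ "2" := fun hh => h.1 (Or.inr hh)
      simp [scanRev, h1, h2, ih h.2]

theorem foldB_eq_scanRev (seg : List String) :
    decide ((seg.foldl stepB (0, -1, -1)).2.1 ≤ (seg.foldl stepB (0, -1, -1)).2.2) = scanRev seg.reverse := by
  obtain ⟨-, -, -, h4⟩ := foldB_spec seg 0 (-1) (-1) (by omega) (by omega)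
  rcases h4 with h4 | ⟨ha, he1, he2⟩
  · exact h4
  · rw [he1, he2, scanRev_all_true seg.reverse ha]
    decide

-- ===== VERDICT (by name: the statement is the Claim_ definition above) =====
theorem check_row_before_spec : Claim_equal_check_row_before := by
  intro board n row clm _ hpre
  unfold Spec_check_row_before check_row_before check_row_before_alt
  by_cases hc : clm ≤ 0
  · have hne : ¬ clm ≠ 0 ∨ clm ≠ 0 := by tauto
    by_cases h0 : clm = 0
    · simp [h0]
    · rw [if_pos (by omega), if_pos hc,
          PySem.List.pyRange_neg_one_eq_nil (by omega)]
      simp [checkRowLoopA]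
  · have hclm : 0 < clm := by omega
    rcases hpre with h | ⟨hrow, hlen⟩
    · omega
    set rowL := (PySem.List.pyGet? board row).getD [] with hrowL
    rw [if_pos (by omega), if_neg hc]
    have hseg : PySem.List.slice rowL none (some clm) = rowL.take clm.toNat :=
      PySem.List.slice_to rowL (by omega)
    have hk : clm = ((clm.toNat : Nat) : Int) := by omega
    rw [hseg, hk, loopA_eq_scanRev board row rowL hrowL.symm clm.toNat (by omega)]
    exact (foldB_eq_scanRev (rowL.take clm.toNat)).symm
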